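-- pv_equiv track=rewrite | github.com/GldnBolt/BattleShipSecondProject | ManejoDeDatos.py | build_scores_str
-- ===== SOURCE A (Python) =====
-- def build_scores_str(Matrix, Scores_text):
--     """
--                Instituto Tecnológico de Costa Rica
--                Ingenieria en Computadores
--        Lenguaje: Python 3.9.9
--        Autores: Claudio Arce Cascante (201058559)
--        Version: 1.0
--        Fecha de última modificación: Mayo 07/ 2022
--        Entradas: Matriz
--        Restricciones: Entrada es Matriz que contiene vectores de 1x2
--        Salidas: String listo para ser colocado en un label de Tkinter
--     """
--     if Matrix == []:
--         return Scores_text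
--     else:
--         if Matrix[0][0] == "":
--             Scores_text += "\n"
--             return build_scores_str(Matrix[1:], Scores_text)
--         else:
--             Scores_text += Matrix[0][0] + " : " + str(Matrix[0][1]) + "\n"
--             return build_scores_str(Matrix[1:], Scores_text)
-- ===== SOURCE B (Python) =====
-- def build_scores_str(Matrix, Scores_text):
--     parts = [Scores_text]
--     for row in Matrix:
--         parts.append("\n" if row[0] == "" else row[0] + " : " + str(row[1]) + "\n")
--     return "".join(parts)
-- ===== Notes on version B (the rewrite author's own statement) =====
-- stated objective: simpler
-- what changed: Replaces tail recursion over Matrix[1:] slices with a single for-loop that collects the per-row pieces and joins them once, avoiding repeated list slicing and string reallocation.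
import Mathlib
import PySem

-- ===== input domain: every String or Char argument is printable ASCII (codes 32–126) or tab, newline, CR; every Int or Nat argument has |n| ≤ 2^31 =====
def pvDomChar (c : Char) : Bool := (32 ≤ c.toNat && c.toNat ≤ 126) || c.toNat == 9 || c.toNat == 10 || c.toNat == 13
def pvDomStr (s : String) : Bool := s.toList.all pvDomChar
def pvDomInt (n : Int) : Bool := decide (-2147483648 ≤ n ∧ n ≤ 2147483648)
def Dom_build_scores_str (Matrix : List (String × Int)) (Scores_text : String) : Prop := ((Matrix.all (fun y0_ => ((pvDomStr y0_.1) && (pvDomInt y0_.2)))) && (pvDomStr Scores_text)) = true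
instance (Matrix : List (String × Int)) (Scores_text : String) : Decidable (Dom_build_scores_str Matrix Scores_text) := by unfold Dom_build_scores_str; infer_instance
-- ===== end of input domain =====

-- B replaces A's tail recursion over Matrix[1:] slices with one loop collecting the per-row pieces, joined once (simpler).

-- ===== PORT A =====
-- literal port of A's recursion: Matrix[1:] is the tail of the cons pattern
def build_scores_str (Matrix : List (String × Int)) (Scores_text : String) : String :=
  match Matrix with
  | [] => Scores_text
  | row :: rest =>
    if row.1 = "" then
      build_scores_str rest (Scores_text ++ "\n")
    else
      build_scores_str rest (Scores_text ++ row.1 ++ " : " ++ PySem.Int.toStr row.2 ++ "\n")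

-- ===== PORT B =====
-- one step of Source B's for-loop: append this row's piece to parts
def pvPiece (row : String × Int) : String :=
  if row.1 = "" then "\n" else row.1 ++ " : " ++ PySem.Int.toStr row.2 ++ "\n"

def build_scores_str_alt (Matrix : List (String × Int)) (Scores_text : String) : String :=
  String.join (Matrix.foldl (fun parts row => parts ++ [pvPiece row]) [Scores_text])

-- ===== PRECONDITION & SPEC =====
def Spec_build_scores_str (Matrix : List (String × Int)) (Scores_text : String) (out : String) : Prop := out = build_scores_str_alt Matrix Scores_text
instance (Matrix : List (String × Int)) (Scores_text : String) (out : String) : Decidable (Spec_build_scores_str Matrix Scores_text out) := by unfold Spec_build_scores_str; infer_instance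

-- ===== CLAIM (what is proved, stated in full; the proofs are below) =====
def Claim_equal_build_scores_str : Prop := ∀ (Matrix : List (String × Int)) (Scores_text : String), Dom_build_scores_str Matrix Scores_text → Spec_build_scores_str Matrix Scores_text (build_scores_str Matrix Scores_text)

-- ===== LEMMAS AND PROOFS =====
theorem pv_join_snoc (l : List String) (x : String) :
    String.join (l ++ [x]) = String.join l ++ x := by
  simp [String.join, List.foldl_append]
theorem join_foldl_parts (Matrix : List (String × Int)) (parts : List String) :
    String.join (Matrix.foldl (fun parts row => parts ++ [pvPiece row]) parts)
      = build_scores_str Matrix (String.join parts) := by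
  induction Matrix generalizing parts with
  | nil => simp [build_scores_str]
  | cons row rest ih =>
    simp only [List.foldl_cons, build_scores_str]
    rw [ih]
    split_ifs with h <;> rw [pv_join_snoc] <;> simp [String.join, pvPiece, h, String.append_assoc]

-- ===== VERDICT (by name: the statement is the Claim_ definition above) =====
theorem build_scores_str_spec : Claim_equal_build_scores_str := by
  intro Matrix Scores_text _
  unfold Spec_build_scores_str build_scores_str_alt
  rw [join_foldl_parts]
  simp [String.join]
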